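-- pv_equiv track=rewrite | github.com/Logende/dynamicslicing | src/dynamicslicing/slice_dataflow.py | compute_dataflow_dependents
-- ===== SOURCE A (Python) =====
-- from typing import Any, List, Callable, Sequence, Dict, Set, Tuple
--
-- def compute_dataflow_dependents(dependency_table: Dict[int, Set[int]], slicing_criterion: int) -> Set[int]:
--     created_new_knowledge = True
--     relevant_nodes = {slicing_criterion}
--
--     while created_new_knowledge:
--         created_new_knowledge = False
--
--         for relevant_node in relevant_nodes.copy():
--             for assignment, usages in dependency_table.items():
--                 if relevant_node in usages and assignment not in relevant_nodes:
--                     relevant_nodes.add(assignment)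
--                     created_new_knowledge = True
--     return relevant_nodes
-- ===== SOURCE B (Python) =====
-- def compute_dataflow_dependents(dependency_table, slicing_criterion):
--     # Reverse index: for each used node, the assignments that use it.
--     rev = {}
--     for assignment, usages in dependency_table.items():
--         for u in usages:
--             rev.setdefault(u, []).append(assignment)
--     # Single BFS from the slicing criterion over the reverse index.
--     visited = {slicing_criterion}
--     queue = [slicing_criterion]
--     i = 0
--     while i < len(queue):
--         for a in rev.get(queue[i], []):
--             if a not in visited:
--                 visited.add(a)
--                 queue.append(a)
--         i += 1
--     return visited
-- ===== Notes on version B (the rewrite author's own statement) =====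
-- stated objective: alternative
-- what changed: Replaces the repeated whole-table fixpoint sweeps (rescanning every relevant node against every table entry until no change) with a reverse usage index built once plus a single BFS worklist from the slicing criterion, processing every relevant node exactly once.
import Mathlib
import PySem

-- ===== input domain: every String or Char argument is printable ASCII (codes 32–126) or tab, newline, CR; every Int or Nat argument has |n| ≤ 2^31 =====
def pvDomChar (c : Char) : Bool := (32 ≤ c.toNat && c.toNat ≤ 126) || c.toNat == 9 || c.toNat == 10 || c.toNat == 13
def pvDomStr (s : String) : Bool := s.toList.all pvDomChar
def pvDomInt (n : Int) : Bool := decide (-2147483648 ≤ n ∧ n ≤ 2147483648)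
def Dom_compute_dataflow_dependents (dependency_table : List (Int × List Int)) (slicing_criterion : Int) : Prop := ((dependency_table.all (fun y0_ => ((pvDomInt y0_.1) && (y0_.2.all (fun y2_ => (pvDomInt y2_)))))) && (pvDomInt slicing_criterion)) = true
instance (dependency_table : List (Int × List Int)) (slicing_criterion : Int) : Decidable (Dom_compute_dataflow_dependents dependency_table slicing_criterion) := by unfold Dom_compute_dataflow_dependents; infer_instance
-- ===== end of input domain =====

-- B replaces A's repeated whole-table fixpoint sweeps by a reverse usage index plus one BFS
-- worklist, processing every relevant node once (objective: alternative algorithm).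
-- Python A iterates over set copies in hash order; the resulting SET does not depend on that
-- order, and the ports iterate sets in insertion order.

-- ===== PORT A =====
-- one 'while' round of A: for relevant_node in relevant_nodes.copy(): for (assignment, usages)
-- in table: if relevant_node in usages and assignment not in relevant_nodes: add, flag
def pvPassA (dependency_table : List (Int × List Int)) (S : PySem.Set Int) : PySem.Set Int × Bool :=
  S.foldl (fun st rn =>
    dependency_table.foldl (fun st e =>
      if PySem.Set.contains e.2 rn && !(PySem.Set.contains st.1 e.1) then
        (PySem.Set.add st.1 e.1, true)
      else st) st) (S, false)

-- the while loop; each productive round adds at least one table key, so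
-- length+1 rounds of fuel always reach the unproductive final round
def pvLoopA (dependency_table : List (Int × List Int)) : Nat → PySem.Set Int → PySem.Set Int
  | 0, S => S
  | n+1, S =>
    let st := pvPassA dependency_table S
    if st.2 then pvLoopA dependency_table n st.1 else st.1

def compute_dataflow_dependents (dependency_table : List (Int × List Int)) (slicing_criterion : Int) : List Int :=
  pvLoopA dependency_table (dependency_table.length + 1) (PySem.Set.ofList [slicing_criterion])

-- ===== PORT B =====
-- rev = {}; for assignment, usages in table.items(): for u in usages: rev.setdefault(u, []).append(assignment)
def pvRev (dependency_table : List (Int × List Int)) : PySem.Dict Int (List Int) :=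
  dependency_table.foldl (fun d e =>
    e.2.foldl (fun d u => d.modify u [] (fun l => l ++ [e.1])) d) PySem.Dict.empty

-- while i < len(queue): for a in rev.get(queue[i], []): if a not in visited: add to both; i += 1
-- (the queue only ever holds distinct nodes, so length+2 steps of fuel always reach the end)
def pvBFS (rev : PySem.Dict Int (List Int)) : Nat → PySem.Set Int → List Int → Nat → PySem.Set Int
  | 0, visited, _, _ => visited
  | n+1, visited, queue, i =>
    if h : i < queue.length then
      let st := (rev.getD queue[i] []).foldl
        (fun (st : PySem.Set Int × List Int) a =>
          if PySem.Set.contains st.1 a then st else (PySem.Set.add st.1 a, st.2 ++ [a]))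
        (visited, queue)
      pvBFS rev n st.1 st.2 (i+1)
    else visited

def compute_dataflow_dependents_alt (dependency_table : List (Int × List Int)) (slicing_criterion : Int) : List Int :=
  pvBFS (pvRev dependency_table) (dependency_table.length + 2)
    (PySem.Set.ofList [slicing_criterion]) [slicing_criterion] 0

-- ===== PRECONDITION & SPEC =====
def Spec_compute_dataflow_dependents (dependency_table : List (Int × List Int)) (slicing_criterion : Int) (out : List Int) : Prop := out = compute_dataflow_dependents_alt dependency_table slicing_criterion
instance (dependency_table : List (Int × List Int)) (slicing_criterion : Int) (out : List Int) : Decidable (Spec_compute_dataflow_dependents dependency_table slicing_criterion out) := by unfold Spec_compute_dataflow_dependents; infer_instance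

-- ===== CLAIM (what is proved, stated in full; the proofs are below) =====
def Claim_equal_compute_dataflow_dependents : Prop := ∀ (dependency_table : List (Int × List Int)) (slicing_criterion : Int), Dom_compute_dataflow_dependents dependency_table slicing_criterion → Spec_compute_dataflow_dependents dependency_table slicing_criterion (compute_dataflow_dependents dependency_table slicing_criterion)

-- ===== LEMMAS AND PROOFS =====

-- Abstract semantics shared by both reductions: process one node u against the whole table.
def pvAbsStep (t : List (Int × List Int)) (S : List Int) (u : Int) : List Int :=
  t.foldl (fun S e => if u ∈ e.2 ∧ e.1 ∉ S then S ++ [e.1] else S) S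

def pvSweep (t : List (Int × List Int)) (l : List Int) (S : List Int) : List Int :=
  l.foldl (pvAbsStep t) S

-- canonical worklist form (what B's loop computes on its visited = queue state)
def pvChase (t : List (Int × List Int)) : Nat → List Int → Nat → List Int
  | 0, S, _ => S
  | n+1, S, i =>
    if h : i < S.length then pvChase t n (pvAbsStep t S S[i]) (i+1) else S

-- "node u is fully processed relative to S"
def pvClosed (t : List (Int × List Int)) (S : List Int) (u : Int) : Prop :=
  ∀ e ∈ t, u ∈ e.2 → e.1 ∈ S

-- ordered dedup-insert of a list of candidates (what B's inner for-loop does to visited)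
def pvUpd (S : List Int) (l : List Int) : List Int :=
  l.foldl (fun S a => if a ∈ S then S else S ++ [a]) S

-- occurrence list of the reverse index at u
def pvOcc (t : List (Int × List Int)) (u : Int) : List Int :=
  t.flatMap (fun e => (e.2.filter (· == u)).map (fun _ => e.1))

-- ---- basic facts about pvAbsStep / pvSweep ----

theorem pvAbsStep_prefix (t : List (Int × List Int)) (S : List Int) (u : Int) :
    S <+: pvAbsStep t S u := by
  induction t generalizing S with
  | nil => exact List.prefix_rfl
  | cons e t ih =>
    refine List.IsPrefix.trans ?_ (ih _)
    by_cases h : u ∈ e.2 ∧ e.1 ∉ S <;> simp [h]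

theorem pvAbsStep_subset (t : List (Int × List Int)) (S : List Int) (u : Int) :
    S ⊆ pvAbsStep t S u := (pvAbsStep_prefix t S u).subset

theorem pvAbsStep_length (t : List (Int × List Int)) (S : List Int) (u : Int) :
    S.length ≤ (pvAbsStep t S u).length := (pvAbsStep_prefix t S u).length_le

theorem pvAbsStep_nodup (t : List (Int × List Int)) (S : List Int) (u : Int)
    (h : S.Nodup) : (pvAbsStep t S u).Nodup := by
  induction t generalizing S with
  | nil => exact h
  | cons e t ih =>
    simp only [pvAbsStep, List.foldl_cons]
    by_cases hc : u ∈ e.2 ∧ e.1 ∉ S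
    · rw [if_pos hc]
      refine ih _ ?_
      rw [List.nodup_append]
      refine ⟨h, List.nodup_singleton _, ?_⟩
      intro a ha b hb
      simp only [List.mem_singleton] at hb
      subst hb
      exact fun h' => hc.2 (h' ▸ ha)
    · rw [if_neg hc]; exact ih _ h

theorem pvAbsStep_mem_keys (t : List (Int × List Int)) (S : List Int) (u : Int)
    (x : Int) (hx : x ∈ pvAbsStep t S u) : x ∈ S ∨ x ∈ t.map (·.1) := by
  induction t generalizing S with
  | nil => exact Or.inl hx
  | cons e t ih =>
    simp only [pvAbsStep, List.foldl_cons] at hx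
    rcases ih _ hx with h | h
    · by_cases hc : u ∈ e.2 ∧ e.1 ∉ S
      · rw [if_pos hc] at h
        rcases List.mem_append.mp h with h | h
        · exact Or.inl h
        · exact Or.inr (by simp [List.mem_singleton.mp h])
      · rw [if_neg hc] at h; exact Or.inl h
    · exact Or.inr (by simp [List.mem_cons]; right; simpa using h)

theorem pvClosed_mono (t : List (Int × List Int)) {S S' : List Int} (u : Int)
    (hss : S ⊆ S') (h : pvClosed t S u) : pvClosed t S' u :=
  fun e he hu => hss (h e he hu)

theorem pvAbsStep_of_closed (t : List (Int × List Int)) (S : List Int) (u : Int)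
    (h : pvClosed t S u) : pvAbsStep t S u = S := by
  induction t generalizing S with
  | nil => rfl
  | cons e t ih =>
    simp only [pvAbsStep, List.foldl_cons]
    have he : ¬ (u ∈ e.2 ∧ e.1 ∉ S) := by
      intro hc; exact hc.2 (h e (List.mem_cons_self) hc.1)
    simp only [he, if_false]
    exact ih _ (fun e' he' hu => h e' (List.mem_cons_of_mem _ he') hu)

theorem pvClosed_absStep (t : List (Int × List Int)) (S : List Int) (u : Int) :
    pvClosed t (pvAbsStep t S u) u := by
  induction t generalizing S with
  | nil => intro e he; simp at he
  | cons e t ih =>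
    intro e' he' hu
    simp only [pvAbsStep, List.foldl_cons]
    rcases List.mem_cons.mp he' with rfl | he'
    · -- e'.1 is in the state after the head step, hence in the final state
      refine pvAbsStep_subset t _ u ?_
      by_cases hm : e'.1 ∈ S
      · by_cases hc : u ∈ e'.2 ∧ e'.1 ∉ S <;> simp [hc, hm]
      · simp [hu, hm]
    · exact ih _ e' he' hu

theorem pvSweep_prefix (t : List (Int × List Int)) (l S : List Int) :
    S <+: pvSweep t l S := by
  induction l generalizing S with
  | nil => exact List.prefix_rfl
  | cons u l ih => exact (pvAbsStep_prefix t S u).trans (ih _)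

theorem pvSweep_nodup (t : List (Int × List Int)) (l S : List Int) (h : S.Nodup) :
    (pvSweep t l S).Nodup := by
  induction l generalizing S with
  | nil => exact h
  | cons u l ih => exact ih _ (pvAbsStep_nodup t S u h)

theorem pvSweep_mem_keys (t : List (Int × List Int)) (l S : List Int)
    (x : Int) (hx : x ∈ pvSweep t l S) : x ∈ S ∨ x ∈ t.map (·.1) := by
  induction l generalizing S with
  | nil => exact Or.inl hx
  | cons u l ih =>
    rcases ih _ hx with h | h
    · exact pvAbsStep_mem_keys t S u x h
    · exact Or.inr h

theorem pvSweep_closed (t : List (Int × List Int)) (l S : List Int)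
    (u : Int) (hu : u ∈ l) : pvClosed t (pvSweep t l S) u := by
  induction l generalizing S with
  | nil => simp at hu
  | cons v l ih =>
    rcases List.mem_cons.mp hu with rfl | hu
    · exact pvClosed_mono t u (pvSweep_prefix t l _).subset (pvClosed_absStep t S u)
    · exact ih _ hu

theorem pvSweep_of_closed (t : List (Int × List Int)) (l S : List Int)
    (h : ∀ u ∈ l, pvClosed t S u) : pvSweep t l S = S := by
  induction l with
  | nil => rfl
  | cons u l ih =>
    have : pvAbsStep t S u = S := pvAbsStep_of_closed t S u (h u (List.mem_cons_self))
    simp only [pvSweep, List.foldl_cons, this]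
    exact ih (fun v hv => h v (List.mem_cons_of_mem _ hv))

-- ---- A side: pvPassA computes a full sweep plus a "did it grow" flag ----

theorem pvInnerA_eq (t : List (Int × List Int)) (u : Int) :
    ∀ (S : List Int) (b : Bool),
      t.foldl (fun st e =>
        if PySem.Set.contains e.2 u && !(PySem.Set.contains st.1 e.1) then
          (PySem.Set.add st.1 e.1, true)
        else st) (S, b)
      = (pvAbsStep t S u, b || decide (pvAbsStep t S u ≠ S)) := by
  induction t with
  | nil => intro S b; simp [pvAbsStep]
  | cons e t ih =>
    intro S b
    simp only [List.foldl_cons]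
    by_cases hc : u ∈ e.2 ∧ e.1 ∉ S
    · have hg : (PySem.Set.contains e.2 u && !(PySem.Set.contains S e.1)) = true := by
        simp only [Bool.and_eq_true, Bool.not_eq_true']
        refine ⟨(PySem.Set.contains_iff _ _).mpr hc.1, ?_⟩
        rw [← Bool.not_eq_true]
        intro hcon
        exact hc.2 ((PySem.Set.contains_iff _ _).mp hcon)
      rw [if_pos hg]
      have hadd : PySem.Set.add S e.1 = S ++ [e.1] := PySem.Set.add_of_not_mem hc.2
      simp only [hadd]
      rw [ih]
      have hstep : pvAbsStep (e :: t) S u = pvAbsStep t (S ++ [e.1]) u := by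
        simp only [pvAbsStep, List.foldl_cons, if_pos hc]
      have hne : pvAbsStep (e :: t) S u ≠ S := by
        intro heq
        have h1 : (S ++ [e.1]).length ≤ (pvAbsStep t (S ++ [e.1]) u).length :=
          pvAbsStep_length t _ u
        rw [← hstep, heq] at h1
        simp at h1
      simp [hstep]
      exact Or.inr (by rw [← hstep]; exact hne)
    · have hg : (PySem.Set.contains e.2 u && !(PySem.Set.contains S e.1)) = false := by
        rw [← Bool.not_eq_true]
        intro hcon
        simp only [Bool.and_eq_true, Bool.not_eq_true'] at hcon
        refine hc ⟨(PySem.Set.contains_iff _ _).mp hcon.1, ?_⟩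
        intro hm
        rw [(PySem.Set.contains_iff _ _).mpr hm] at hcon
        exact Bool.noConfusion hcon.2
      rw [if_neg (by rw [hg]; exact Bool.false_ne_true)]
      rw [ih]
      have hstep : pvAbsStep (e :: t) S u = pvAbsStep t S u := by
        simp only [pvAbsStep, List.foldl_cons, if_neg hc]
      rw [hstep]

theorem pvPassA_eq (t : List (Int × List Int)) (S : List Int) :
    pvPassA t S = (pvSweep t S S, decide (pvSweep t S S ≠ S)) := by
  suffices h : ∀ (l S' : List Int) (b : Bool),
      l.foldl (fun st rn =>
        t.foldl (fun st e =>
          if PySem.Set.contains e.2 rn && !(PySem.Set.contains st.1 e.1) then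
            (PySem.Set.add st.1 e.1, true)
          else st) st) (S', b)
      = (pvSweep t l S', b || decide (pvSweep t l S' ≠ S')) by
    simpa [pvPassA] using h S S false
  intro l
  induction l with
  | nil => intro S' b; simp [pvSweep]
  | cons u l ih =>
    intro S' b
    simp only [List.foldl_cons]
    rw [pvInnerA_eq, ih]
    have hsw : pvSweep t (u :: l) S' = pvSweep t l (pvAbsStep t S' u) := rfl
    refine Prod.ext (by rw [hsw]) ?_
    simp only [hsw]
    set M := pvAbsStep t S' u with hM
    set F := pvSweep t l M with hF
    have hpm : S' <+: M := pvAbsStep_prefix t S' u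
    have hpf : M <+: F := pvSweep_prefix t l M
    by_cases hFS : F = S'
    · have hMS : M = S' :=
        (hpm.eq_of_length (Nat.le_antisymm hpm.length_le (hFS ▸ hpf.length_le))).symm
      simp [hFS, hMS]
    · by_cases hMS : M = S'
      · have hFM : F ≠ M := fun h => hFS (h.trans hMS)
        simp [hFS, hMS]
      · simp [hFS, hMS]

-- ---- B side: the reverse index and the worklist fold ----

theorem pvRev_getD (t : List (Int × List Int)) (u : Int) :
    (pvRev t).getD u [] = pvOcc t u := by
  suffices h : ∀ d : PySem.Dict Int (List Int),
      (t.foldl (fun d e =>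
        e.2.foldl (fun d u' => d.modify u' [] (fun l => l ++ [e.1])) d) d).getD u []
      = d.getD u [] ++ pvOcc t u by
    have h0 : (PySem.Dict.empty : PySem.Dict Int (List Int)).getD u [] = [] := rfl
    simpa [pvRev, h0] using h PySem.Dict.empty
  induction t with
  | nil => intro d; simp [pvOcc]
  | cons e t ih =>
    intro d
    simp only [List.foldl_cons]
    rw [ih]
    have hmap : e.2.foldl (fun d u' => d.modify u' [] (fun l => l ++ [e.1])) d
        = (e.2.map (fun u' => (u', e.1))).foldl
            (fun d p => d.modify p.1 [] (fun l => l ++ [p.2])) d := by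
      rw [List.foldl_map]
    rw [hmap, PySem.Dict.getD_foldl_modify_append]
    have hfil : (((e.2.map (fun u' => (u', e.1))).filter (fun p => p.1 == u)).map (·.2))
        = (e.2.filter (· == u)).map (fun _ => e.1) := by
      rw [List.filter_map, List.map_map]
      rfl
    rw [hfil]
    simp [pvOcc]

theorem pvUpd_occ (t : List (Int × List Int)) (S : List Int) (u : Int) :
    pvUpd S (pvOcc t u) = pvAbsStep t S u := by
  induction t generalizing S with
  | nil => rfl
  | cons e t ih =>
    have hocc : pvOcc (e :: t) u
        = ((e.2.filter (· == u)).map (fun _ => e.1)) ++ pvOcc t u := by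
      simp [pvOcc]
    have happ : ∀ xs ys, pvUpd S (xs ++ ys) = pvUpd (pvUpd S xs) ys := by
      intro xs ys; simp [pvUpd, List.foldl_append]
    rw [hocc, happ]
    have hstep : pvAbsStep (e :: t) S u
        = pvAbsStep t (if u ∈ e.2 ∧ e.1 ∉ S then S ++ [e.1] else S) u := by
      simp only [pvAbsStep, List.foldl_cons]
    rw [hstep, ← ih]
    congr 1
    -- pvUpd S of k copies of e.1 is the conditional single insert
    have hconstmem : ∀ (l' : List Int) (S' : List Int), e.1 ∈ S' →
        pvUpd S' (l'.map (fun _ => e.1)) = S' := by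
      intro l'
      induction l' with
      | nil => intro S' _; rfl
      | cons x l' ihl =>
        intro S' hm
        simp only [List.map_cons, pvUpd, List.foldl_cons, if_pos hm]
        exact ihl S' hm
    rcases hf : e.2.filter (· == u) with _ | ⟨x, l'⟩
    · have hnu : u ∉ e.2 := by
        intro hm
        have : u ∈ e.2.filter (· == u) := List.mem_filter.mpr ⟨hm, by simp⟩
        rw [hf] at this; simp at this
      simp [pvUpd, hnu]
    · have hu : u ∈ e.2 := by
        have hx : x ∈ e.2.filter (· == u) := by rw [hf]; exact List.mem_cons_self
        have := List.mem_filter.mp hx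
        have hxu : x = u := by simpa using this.2
        exact hxu ▸ this.1
      by_cases hm : e.1 ∈ S
      · rw [hconstmem _ _ hm]
        simp [hu, hm]
      · simp only [List.map_cons, pvUpd, List.foldl_cons, if_neg hm]
        have : e.1 ∈ S ++ [e.1] := by simp
        have h2 := hconstmem l' (S ++ [e.1]) this
        simp only [pvUpd] at h2
        rw [h2]
        simp [hu, hm]

theorem pvPairFold_eq (l : List Int) :
    ∀ S : List Int,
      l.foldl (fun (st : PySem.Set Int × List Int) a =>
        if PySem.Set.contains st.1 a then st else (PySem.Set.add st.1 a, st.2 ++ [a])) (S, S)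
      = (pvUpd S l, pvUpd S l) := by
  induction l with
  | nil => intro S; rfl
  | cons a l ih =>
    intro S
    simp only [List.foldl_cons, pvUpd]
    by_cases h : a ∈ S
    · rw [if_pos ((PySem.Set.contains_iff _ _).mpr h), if_pos h]
      exact ih S
    · have hc : PySem.Set.contains S a = false := by
        rw [← Bool.not_eq_true]
        intro hcon; exact h ((PySem.Set.contains_iff _ _).mp hcon)
      rw [if_neg (by rw [hc]; exact Bool.false_ne_true), if_neg h]
      have hadd : PySem.Set.add S a = S ++ [a] := PySem.Set.add_of_not_mem h
      rw [hadd]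
      exact ih (S ++ [a])

theorem pvBFS_eq_chase (t : List (Int × List Int)) :
    ∀ (fuel : Nat) (S : List Int) (i : Nat),
      pvBFS (pvRev t) fuel S S i = pvChase t fuel S i := by
  intro fuel
  induction fuel with
  | zero => intro S i; rfl
  | succ n ih =>
    intro S i
    simp only [pvBFS, pvChase]
    by_cases h : i < S.length
    · rw [dif_pos h, dif_pos h]
      rw [pvPairFold_eq, pvRev_getD, pvUpd_occ]
      exact ih (pvAbsStep t S S[i]) (i + 1)
    · rw [dif_neg h, dif_neg h]

-- ---- the bridge: fixpoint rounds = worklist chase ----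

theorem pvPrefix_drop_take {S S1 : List Int} (h : S <+: S1) (k j : Nat)
    (hkj : k + j ≤ S.length) : (S1.drop k).take j = (S.drop k).take j := by
  obtain ⟨r, rfl⟩ := h
  rw [List.drop_append_of_le_length (by omega),
      List.take_append_of_le_length (by simp; omega)]

theorem pvChase_sweep (t : List (Int × List Int)) :
    ∀ (n : Nat) (S : List Int) (i m fB : Nat), i ≤ m → m ≤ S.length → m - i = n → n ≤ fB →
      pvChase t fB S i = pvChase t (fB - n) (pvSweep t ((S.drop i).take n) S) m := by
  intro n
  induction n with
  | zero =>
    intro S i m fB h1 h2 h3 _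
    have : m = i := by omega
    subst this
    simp [pvSweep]
  | succ n ih =>
    intro S i m fB h1 h2 h3 h4
    have hi : i < S.length := by omega
    obtain ⟨f, rfl⟩ : ∃ f, fB = f + 1 := ⟨fB - 1, by omega⟩
    simp only [pvChase]
    rw [dif_pos hi]
    rw [ih (pvAbsStep t S S[i]) (i+1) m f (by omega)
        (le_trans h2 (pvAbsStep_length t S S[i])) (by omega) (by omega)]
    have hpre : (List.take n (List.drop (i+1) (pvAbsStep t S S[i])))
        = List.take n (List.drop (i+1) S) :=
      pvPrefix_drop_take (pvAbsStep_prefix t S S[i]) (i+1) n (by omega)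
    rw [hpre]
    have hdt : List.take (n+1) (List.drop i S) = S[i] :: List.take n (List.drop (i+1) S) := by
      rw [← List.getElem_cons_drop hi, List.take_cons (by omega)]
      norm_num
    rw [hdt]
    have hfuel : f + 1 - (n + 1) = f - n := by omega
    rw [hfuel]
    rfl

theorem pvMain (t : List (Int × List Int)) (Kc : List Int)
    (hK : ∀ e ∈ t, e.1 ∈ Kc) :
    ∀ (fA : Nat) (S : List Int) (i fB : Nat),
      (∀ j, (hj : j < S.length) → j < i → pvClosed t S S[j]) →
      i ≤ S.length → S.Nodup → (∀ x ∈ S, x ∈ Kc) →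
      Kc.length + 1 ≤ fA + S.length → Kc.length + 1 ≤ fB + i →
      pvLoopA t fA S = pvChase t fB S i := by
  intro fA
  induction fA with
  | zero =>
    intro S i fB hcl hi hnd hsub hfA hfB
    have hSK : S.length ≤ Kc.length := (hnd.subperm (fun x hx => hsub x hx)).length_le
    omega
  | succ fA ih =>
    intro S i fB hcl hi hnd hsub hfA hfB
    have hSK : S.length ≤ Kc.length := (hnd.subperm (fun x hx => hsub x hx)).length_le
    -- one round of A is a sweep over the current snapshot
    simp only [pvLoopA, pvPassA_eq]
    -- the first i nodes are already processed, so the sweep starts at position i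
    have hclosed_take : ∀ u ∈ S.take i, pvClosed t S u := by
      intro u hu
      obtain ⟨j, hj, rfl⟩ := List.mem_iff_getElem.mp hu
      have hjlen : j < S.length := lt_of_lt_of_le hj (by simp)
      have hji : j < i := by
        have := List.length_take_le i S
        have h2 : j < min i S.length := by
          simpa using hj
        omega
      have : (List.take i S)[j] = S[j] := List.getElem_take
      rw [this]
      exact hcl j hjlen hji
    have hnop : pvSweep t S S = pvSweep t (S.drop i) S := by
      calc pvSweep t S S = pvSweep t (S.take i ++ S.drop i) S := by
            rw [List.take_append_drop]
        _ = pvSweep t (S.drop i) (pvSweep t (S.take i) S) := by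
            simp only [pvSweep]
            rw [List.foldl_append]
        _ = pvSweep t (S.drop i) S := by
            rw [pvSweep_of_closed t _ S hclosed_take]
    -- the chase performs exactly this sweep, reaching index S.length
    have hch : pvChase t fB S i
        = pvChase t (fB - (S.length - i)) (pvSweep t (S.drop i) S) S.length := by
      have hdt : (List.take (S.length - i) (List.drop i S)) = S.drop i :=
        List.take_of_length_le (by simp)
      have h0 := pvChase_sweep t (S.length - i) S i S.length fB hi rfl.le rfl (by omega)
      rw [hdt] at h0
      exact h0
    set T := pvSweep t S S with hT
    have hTd : T = pvSweep t (S.drop i) S := hnop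
    have hpT : S <+: T := pvSweep_prefix t S S
    by_cases hTS : T = S
    · rw [if_neg (by simp [hTS])]
      rw [hch, ← hTd, hTS]
      obtain ⟨f, hf⟩ : ∃ f, fB - (S.length - i) = f + 1 :=
        ⟨fB - (S.length - i) - 1, by omega⟩
      rw [hf]
      simp [pvChase]
    · rw [if_pos (by simp [hTS])]
      rw [hch, ← hTd]
      apply ih T S.length (fB - (S.length - i))
      · intro j hjT hjS
        have hTj : T[j] = S[j] := (hpT.getElem hjS).symm
        rw [hTj]
        by_cases hji : j < i
        · exact pvClosed_mono t S[j] hpT.subset (hcl j hjS hji)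
        · have hmem : S[j] ∈ S.drop i := by
            have hd : j - i < (S.drop i).length := by simp; omega
            have : (S.drop i)[j - i] = S[j] := by
              rw [List.getElem_drop]
              congr 1
              omega
            exact this ▸ List.getElem_mem hd
          rw [hTd]
          exact pvSweep_closed t (S.drop i) S S[j] hmem
      · exact hpT.length_le
      · exact pvSweep_nodup t S S hnd
      · intro x hx
        rcases pvSweep_mem_keys t S S x hx with h | h
        · exact hsub x h
        · obtain ⟨e, he, rfl⟩ := List.mem_map.mp h
          exact hK e he
      · have hlt : S.length < T.length := by
          rcases Nat.lt_or_ge S.length T.length with h | h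
          · exact h
          · exact absurd (hpT.eq_of_length (Nat.le_antisymm hpT.length_le h)).symm hTS
        omega
      · omega

-- ===== VERDICT (by name: the statement is the Claim_ definition above) =====
theorem compute_dataflow_dependents_spec : Claim_equal_compute_dataflow_dependents := by
  intro table c _
  unfold Spec_compute_dataflow_dependents
  unfold compute_dataflow_dependents compute_dataflow_dependents_alt
  have hS0 : PySem.Set.ofList [c] = [c] := rfl
  rw [hS0, pvBFS_eq_chase]
  have hlen : (PySem.Set.ofList (c :: table.map (·.1))).length ≤ table.length + 1 := by
    have := PySem.Set.length_ofList_le (c :: table.map (·.1))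
    simpa using this
  refine pvMain table (PySem.Set.ofList (c :: table.map (·.1)))
      (fun e he => (PySem.Set.mem_ofList _ _).mpr
        (List.mem_cons_of_mem _ (List.mem_map.mpr ⟨e, he, rfl⟩)))
      (table.length + 1) [c] 0 (table.length + 2) ?_ ?_ ?_ ?_ ?_ ?_
  · intro j _ hj0
    exact absurd hj0 (Nat.not_lt_zero j)
  · simp
  · exact List.nodup_singleton c
  · intro x hx
    rw [PySem.Set.mem_ofList]
    simp only [List.mem_singleton] at hx
    simp [hx]
  · simp only [List.length_singleton]
    omega
  · omega
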